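-- pv_equiv track=rewrite | github.com/guy-mcdowell/db2-Compare | db2_compare.py | _group_by_table
-- ===== SOURCE A (Python) =====
-- from typing import Dict, List, Tuple, Any
--
-- def _group_by_table(tables: List[Dict]) -> Dict:
--     """Group table records by schema.table"""
--     result = {}
--     for table in tables:
--         key = f"{table['tabschema']}.{table['tabname']}"
--         if key not in result:
--             result[key] = []
--         result[key].append(table)
--     return result
-- ===== SOURCE B (Python) =====
-- def _group_by_table(tables):
--     """Group table records by schema.table"""
--     key = lambda t: f"{t['tabschema']}.{t['tabname']}"
--     keys = list(dict.fromkeys(map(key, tables)))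
--     return {k: [t for t in tables if key(t) == k] for k in keys}
-- ===== Notes on version B (the rewrite author's own statement) =====
-- stated objective: alternative
-- what changed: B replaces A's single-pass mutable-bucket dict build with a two-phase plan: dedup the keys in first-occurrence order, then build each group by filtering the whole input per key.
import Mathlib
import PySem

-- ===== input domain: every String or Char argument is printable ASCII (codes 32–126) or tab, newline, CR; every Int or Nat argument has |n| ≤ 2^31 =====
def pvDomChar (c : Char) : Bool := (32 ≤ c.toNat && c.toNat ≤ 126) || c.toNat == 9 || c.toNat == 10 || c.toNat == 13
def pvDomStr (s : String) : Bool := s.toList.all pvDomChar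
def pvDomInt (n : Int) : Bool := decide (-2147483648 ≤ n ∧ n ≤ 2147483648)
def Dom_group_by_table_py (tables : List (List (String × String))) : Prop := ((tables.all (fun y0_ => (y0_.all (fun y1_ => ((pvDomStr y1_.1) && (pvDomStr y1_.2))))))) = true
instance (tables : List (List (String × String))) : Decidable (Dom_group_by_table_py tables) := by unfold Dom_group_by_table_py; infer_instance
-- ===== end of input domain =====

-- B replaces A's single-pass mutable-bucket dict build by a two-phase plan (dedup the keys in first-occurrence order, then filter the input per key); alternative decomposition, not claimed faster.
-- Python dict subscript table['…'] on the assoc-list representation: first match; the "" default is only reached outside Pre_ (Python raises KeyError there).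
def pvLookup (t : List (String × String)) (k : String) : String :=
  ((t.find? (fun p => p.1 == k)).map Prod.snd).getD ""

-- key = f"{table['tabschema']}.{table['tabname']}"
def pvKey (t : List (String × String)) : String :=
  pvLookup t "tabschema" ++ "." ++ pvLookup t "tabname"

-- ===== PORT A =====
def group_by_table_py (tables : List (List (String × String))) : List (String × List (List (String × String))) :=
  (tables.foldl (fun result t =>
      let k := pvKey t
      let result := if result.contains k then result
                    else result.insert k ([] : List (List (String × String)))
      result.modify k [] (fun l => l ++ [t]))
    PySem.Dict.empty).items

-- ===== PORT B =====
def group_by_table_py_alt (tables : List (List (String × String))) : List (String × List (List (String × String))) :=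
  let keys := PySem.List.dedup (tables.map pvKey)
  keys.map (fun k => (k, tables.filter (fun t => pvKey t == k)))

-- ===== PRECONDITION & SPEC =====
-- Pre_ excludes records missing a 'tabschema' or 'tabname' field: Python A raises KeyError there.
def Pre_group_by_table_py (tables : List (List (String × String))) : Prop :=
  ∀ t ∈ tables, (∃ p ∈ t, p.1 = "tabschema") ∧ (∃ p ∈ t, p.1 = "tabname")
instance (tables : List (List (String × String))) : Decidable (Pre_group_by_table_py tables) := by unfold Pre_group_by_table_py; infer_instance

def pvWitness_group_by_table_py : (List (List (String × String))) :=
  [[("tabschema", "s1"), ("tabname", "t1")], [("tabschema", "s1"), ("tabname", "t1")], [("tabschema", "s2"), ("tabname", "t2")]]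

def Spec_group_by_table_py (tables : List (List (String × String))) (out : List (String × List (List (String × String)))) : Prop := out = group_by_table_py_alt tables
instance (tables : List (List (String × String))) (out : List (String × List (List (String × String)))) : Decidable (Spec_group_by_table_py tables out) := by unfold Spec_group_by_table_py; infer_instance

-- ===== CLAIM (what is proved, stated in full; the proofs are below) =====
def Claim_equal_group_by_table_py : Prop := ∀ (tables : List (List (String × String))), Dom_group_by_table_py tables → Pre_group_by_table_py tables → Spec_group_by_table_py tables (group_by_table_py tables)

-- ===== LEMMAS AND PROOFS =====

-- A's "if key not in result: result[key] = []" guard followed by the append is one bare modify step.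
theorem pv_step_eq (d : PySem.Dict String (List (List (String × String)))) (k : String) (t : List (String × String)) :
    (if d.contains k then d else d.insert k ([] : List (List (String × String)))).modify k [] (fun l => l ++ [t])
      = d.modify k [] (fun l => l ++ [t]) := by
  by_cases h : d.contains k = true
  · rw [if_pos h]
  · rw [if_neg h]
    unfold PySem.Dict.modify
    rw [PySem.Dict.getD_insert_self]
    have hget : d.getD k [] = [] := by
      have := PySem.Dict.get?_eq_none_iff_contains (d := d) (k := k)
      simp [PySem.Dict.getD, this.2 (by simpa using h)]
    rw [hget]
    apply PySem.Dict.ext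
    have hall : ∀ p ∈ d.items, (p.1 == k) = false := by
      intro p hp
      by_contra hc
      simp only [Bool.not_eq_false] at hc
      exact h (by simp only [PySem.Dict.contains, List.any_eq_true]; exact ⟨p, hp, hc⟩)
    simp only [PySem.Dict.insert, h, if_false, Bool.false_eq_true]
    simp only [List.map_append, List.map_cons, List.map_nil, beq_self_eq_true, if_true]
    rw [List.map_congr_left (fun p hp => by simp [hall p hp] : ∀ p ∈ d.items, (if (p.1 == k) = true then (k, [] ++ [t]) else p) = p)]
    simp

theorem pv_main (tables : List (List (String × String))) :
    group_by_table_py tables = group_by_table_py_alt tables := by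
  unfold group_by_table_py group_by_table_py_alt
  simp only [pv_step_eq]
  have hnd : (tables.foldl (fun d t => d.modify (pvKey t) [] (fun l => l ++ [t])) PySem.Dict.empty).keys.Nodup :=
    PySem.Dict.nodup_keys_foldl_modify_key tables pvKey [] (fun _ t l => l ++ [t]) _ (by simp [PySem.Dict.keys_empty])
  rw [PySem.Dict.items_eq_map_keys _ hnd []]
  rw [PySem.Dict.keys_foldl_modify_key tables pvKey [] (fun _ t l => l ++ [t])]
  rw [PySem.List.dedup_eq_ofList]
  have hkeys : PySem.Set.update (PySem.Dict.empty : PySem.Dict String (List (List (String × String)))).keys (tables.map pvKey)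
      = PySem.Set.ofList (tables.map pvKey) := by
    simp [PySem.Set.update, PySem.Set.ofList, PySem.Dict.keys_empty, PySem.Set.empty]
  rw [hkeys]
  apply List.map_congr_left
  intro k hk
  have hfold : tables.foldl (fun d t => d.modify (pvKey t) [] (fun l => l ++ [t])) PySem.Dict.empty
      = (tables.map (fun t => (pvKey t, t))).foldl (fun d p => d.modify p.1 [] (fun l => l ++ [p.2])) PySem.Dict.empty := by
    rw [List.foldl_map]
  rw [hfold, PySem.Dict.getD_foldl_modify_append]
  rw [List.filter_map]
  simp [Function.comp_def]

-- ===== VERDICT (by name: the statement is the Claim_ definition above) =====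
theorem group_by_table_py_spec : Claim_equal_group_by_table_py := by
  intro tables _ _
  unfold Spec_group_by_table_py
  exact pv_main tables
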